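-- pv_equiv track=rewrite | github.com/sasa5linkar/wordnet_autotranslate- | src/wordnet_autotranslate/workflows/sheet_translation_workflow.py | sort_candidate_records_by_sheet_column
-- ===== SOURCE A (Python) =====
-- from typing import Any, Dict, List, Mapping, Optional, Sequence, Tuple
--
-- def _safe_int(value: Any, default: int = 10**9) -> int:
--     try:
--         return int(str(value))
--     except (TypeError, ValueError):
--         return default
--
-- def sort_candidate_records_by_sheet_column(
--     records: Sequence[Mapping[str, Any]],
-- ) -> List[Dict[str, Any]]:
--     """Sort candidate records by sheet order, then column, then row."""
--     sheet_order: Dict[str, int] = {}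
--     for record in records:
--         sheet_name = str(record.get("sheet_name", ""))
--         if sheet_name not in sheet_order:
--             sheet_order[sheet_name] = len(sheet_order)
--
--     sorted_records = sorted(
--         (dict(record) for record in records),
--         key=lambda record: (
--             sheet_order.get(str(record.get("sheet_name", "")), 10**9),
--             _safe_int(record.get("source_column")),
--             _safe_int(record.get("source_row")),
--             _safe_int(record.get("row_number")),
--         ),
--     )
--     return sorted_records
-- ===== SOURCE B (Python) =====
-- def _safe_int(value, default=10**9):
--     try:
--         return int(str(value))
--     except (TypeError, ValueError):
--         return default
--
--
-- def _record_key(record):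
--     return (
--         _safe_int(record.get("source_column")),
--         _safe_int(record.get("source_row")),
--         _safe_int(record.get("row_number")),
--     )
--
--
-- def sort_candidate_records_by_sheet_column(records):
--     """Partition by sheet (first-appearance order), sort each bucket, concatenate."""
--     buckets = {}
--     for record in records:
--         buckets.setdefault(str(record.get("sheet_name", "")), []).append(dict(record))
--     result = []
--     for bucket in buckets.values():
--         result.extend(sorted(bucket, key=_record_key))
--     return result
-- ===== Notes on version B (the rewrite author's own statement) =====
-- stated objective: alternative
-- what changed: Replaces A's single global stable sort on a 4-part composite key (with a precomputed sheet-name-to-index dict) by partitioning the records into per-sheet buckets in first-appearance order, stably sorting each bucket on the 3-part column/row key alone, and concatenating the buckets.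
import Mathlib
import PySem

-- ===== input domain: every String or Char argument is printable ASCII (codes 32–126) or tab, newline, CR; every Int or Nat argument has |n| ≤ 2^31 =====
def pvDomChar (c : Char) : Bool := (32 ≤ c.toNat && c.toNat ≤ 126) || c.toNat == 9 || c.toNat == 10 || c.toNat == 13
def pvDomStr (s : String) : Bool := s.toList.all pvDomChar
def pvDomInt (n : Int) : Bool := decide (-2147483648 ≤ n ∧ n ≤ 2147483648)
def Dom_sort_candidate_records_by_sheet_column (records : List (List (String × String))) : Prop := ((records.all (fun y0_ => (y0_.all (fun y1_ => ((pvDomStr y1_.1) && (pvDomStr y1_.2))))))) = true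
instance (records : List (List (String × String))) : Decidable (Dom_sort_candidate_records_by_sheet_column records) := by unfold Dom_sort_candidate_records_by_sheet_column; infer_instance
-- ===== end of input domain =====

-- ===== PORT A =====
-- B (port below) partitions records into per-sheet buckets in first-appearance order and sorts
-- each bucket by the 3-part column/row key, instead of A's single global sort on a 4-part key;
-- alternative decomposition, identical results (dict(record) copies are identity on the return value).

-- _safe_int(value) = int(str(value)) with default 10**9; record values are Optional[str]:
-- str(None) = "None" never parses (ValueError -> default), str(s) = s, int(s) = PySem.Int.ofStr?.
def pvSafeInt (value : Option String) : Int :=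
  match value with
  | none => 1000000000
  | some s => (PySem.Int.ofStr? s).getD 1000000000

-- str(record.get("sheet_name", "")) (record values are str, so str(.) is the identity)
def pvSheetName (record : List (String × String)) : String :=
  PySem.Dict.getD ⟨record⟩ "sheet_name" ""

-- the three _safe_int key components, shared verbatim by A's sort key and B's bucket sort key
def pvKey3 (record : List (String × String)) : List Int :=
  [pvSafeInt (PySem.Dict.get? ⟨record⟩ "source_column"),
   pvSafeInt (PySem.Dict.get? ⟨record⟩ "source_row"),
   pvSafeInt (PySem.Dict.get? ⟨record⟩ "row_number")]

-- Python's 4-tuple key is encoded as a 4-element List Int: `<` on equal-length Int lists is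
-- exactly Python's lexicographic tuple comparison.
def sort_candidate_records_by_sheet_column (records : List (List (String × String))) : List (List (String × String)) :=
  let sheet_order : PySem.Dict String Int :=
    records.foldl (fun d record =>
      let sheet_name := pvSheetName record
      if d.contains sheet_name then d
      else d.insert sheet_name d.items.length) ⟨[]⟩   -- d.items.length = len(sheet_order)
  PySem.List.sorted records
    (fun record => PySem.Dict.getD sheet_order (pvSheetName record) 1000000000 :: pvKey3 record)

-- ===== PORT B =====
def sort_candidate_records_by_sheet_column_alt (records : List (List (String × String))) : List (List (String × String)) :=
  let buckets : PySem.Dict String (List (List (String × String))) :=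
    records.foldl (fun d record =>
      let sheet_name := pvSheetName record
      d.insert sheet_name (d.getD sheet_name [] ++ [record])) ⟨[]⟩   -- setdefault(...).append(dict(record))
  buckets.items.foldl (fun result p => result ++ PySem.List.sorted p.2 pvKey3) []

-- ===== PRECONDITION & SPEC =====
def Spec_sort_candidate_records_by_sheet_column (records : List (List (String × String))) (out : List (List (String × String))) : Prop := out = sort_candidate_records_by_sheet_column_alt records
instance (records : List (List (String × String))) (out : List (List (String × String))) : Decidable (Spec_sort_candidate_records_by_sheet_column records out) := by unfold Spec_sort_candidate_records_by_sheet_column; infer_instance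

-- ===== CLAIM (what is proved, stated in full; the proofs are below) =====
def Claim_equal_sort_candidate_records_by_sheet_column : Prop := ∀ (records : List (List (String × String))), Dom_sort_candidate_records_by_sheet_column records → Spec_sort_candidate_records_by_sheet_column records (sort_candidate_records_by_sheet_column records)

-- ===== LEMMAS AND PROOFS =====

-- the distinct sheet names in first-appearance order
def pvNames (records : List (List (String × String))) : List String :=
  PySem.Set.ofList (records.map pvSheetName)

-- A's sheet_order dict, as a standalone definition (identical fold)
def pvBuildA (records : List (List (String × String))) : PySem.Dict String Int :=
  records.foldl (fun d record =>
    let sheet_name := pvSheetName record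
    if d.contains sheet_name then d
    else d.insert sheet_name d.items.length) ⟨[]⟩

-- B's buckets dict, as a standalone definition (identical fold)
def pvBuildB (records : List (List (String × String))) : PySem.Dict String (List (List (String × String))) :=
  records.foldl (fun d record =>
    let sheet_name := pvSheetName record
    d.insert sheet_name (d.getD sheet_name [] ++ [record])) ⟨[]⟩

lemma pvA_unfold (records : List (List (String × String))) :
    sort_candidate_records_by_sheet_column records =
      PySem.List.sorted records
        (fun record => PySem.Dict.getD (pvBuildA records) (pvSheetName record) 1000000000 :: pvKey3 record) := rfl

lemma pvB_unfold (records : List (List (String × String))) :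
    sort_candidate_records_by_sheet_column_alt records =
      (pvBuildB records).items.foldl (fun result p => result ++ PySem.List.sorted p.2 pvKey3) [] := rfl

-- insertBy passes over a prefix it does not insert into
lemma pv_ins_skip {α : Type} (before : α → α → Bool) (x : α) (l r : List α)
    (h : ∀ y ∈ l, before x y = false) :
    PySem.List.insertBy before x (l ++ r) = l ++ PySem.List.insertBy before x r := by
  induction l with
  | nil => simp
  | cons a l ih =>
    simp only [List.cons_append, PySem.List.insertBy, h a (by simp)]
    simp only [Bool.false_eq_true, if_false, List.cons.injEq, true_and]
    exact ih fun y hy => h y (by simp [hy])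

-- insertBy never reaches a suffix everything in which goes after x
lemma pv_ins_stop {α : Type} (before : α → α → Bool) (x : α) (l r : List α)
    (h : ∀ y ∈ r, before x y = true) :
    PySem.List.insertBy before x (l ++ r) = PySem.List.insertBy before x l ++ r := by
  induction l with
  | nil =>
    cases r with
    | nil => simp
    | cons b r' => simp [PySem.List.insertBy, h b (by simp)]
  | cons a l ih =>
    by_cases hb : before x a
    · simp [PySem.List.insertBy, hb]
    · simp only [List.cons_append, PySem.List.insertBy, hb]
      simp [ih]

-- insertBy only looks at `before x` on list members
lemma pv_ins_congr {α : Type} (b b' : α → α → Bool) (x : α) (l : List α)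
    (h : ∀ y ∈ l, b x y = b' x y) :
    PySem.List.insertBy b x l = PySem.List.insertBy b' x l := by
  induction l with
  | nil => rfl
  | cons a l ih =>
    simp only [PySem.List.insertBy, h a (by simp)]
    by_cases hb : b' x a
    · simp [hb]
    · simp only [hb, Bool.false_eq_true, if_false, List.cons.injEq, true_and]
      exact ih fun y hy => h y (by simp [hy])

lemma pv_sorted_append {α κ : Type} [LT κ] [DecidableLT κ] (xs : List α) (x : α) (key : α → κ) :
    PySem.List.sorted (xs ++ [x]) key false =
      PySem.List.insertBy (fun a b => decide (key a < key b)) x (PySem.List.sorted xs key false) := by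
  rw [PySem.List.sorted_eq_foldl_insertBy, PySem.List.sorted_eq_foldl_insertBy, List.foldl_append]
  rfl

lemma pv_ofList_append {α : Type} [BEq α] (l : List α) (x : α) :
    PySem.Set.ofList (l ++ [x]) = PySem.Set.add (PySem.Set.ofList l) x := by
  rw [PySem.Set.ofList_eq_foldl, PySem.Set.ofList_eq_foldl, List.foldl_append]
  rfl

-- one insertion into a concatenation of strictly key-increasing groups lands in its own group
lemma pvINS {α : Type} (ord : α → Int) (key3 : α → List Int) (x : α) (g0 : Int)
    (hx : ord x = g0) (gs : List Int) (F : Int → List α)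
    (hp : gs.Pairwise (· < ·)) (hg : g0 ∈ gs) (hF : ∀ g, ∀ y ∈ F g, ord y = g) :
    PySem.List.insertBy (fun a b => decide ((ord a :: key3 a) < (ord b :: key3 b))) x (gs.flatMap F) =
      gs.flatMap (fun g => if g = g0 then
        PySem.List.insertBy (fun a b => decide ((ord a :: key3 a) < (ord b :: key3 b))) x (F g) else F g) := by
  induction gs with
  | nil => cases hg
  | cons g gs' ih =>
    rw [List.flatMap_cons, List.flatMap_cons]
    by_cases hgg : g = g0
    · subst hgg
      have hno : g ∉ gs' := fun hmem => lt_irrefl g ((List.pairwise_cons.mp hp).1 g hmem)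
      have hrest : ∀ y ∈ gs'.flatMap F,
          (fun a b => decide ((ord a :: key3 a) < (ord b :: key3 b))) x y = true := by
        intro y hy
        obtain ⟨g2, hg2, hyF⟩ := List.mem_flatMap.mp hy
        have hlt : g < g2 := (List.pairwise_cons.mp hp).1 g2 hg2
        simp only [decide_eq_true_eq]
        exact List.cons_lt_cons_iff.mpr (Or.inl (by rw [hx, hF g2 y hyF]; exact hlt))
      rw [pv_ins_stop _ _ _ _ hrest, if_pos rfl]
      congr 1
      exact (List.flatMap_congr (fun g2 hg2 =>
        if_neg (fun h : g2 = g => hno (h ▸ hg2)))).symm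
    · have hg0m : g0 ∈ gs' := by
        rcases List.mem_cons.mp hg with h | h
        · exact absurd h.symm hgg
        · exact h
      have hglt : g < g0 := (List.pairwise_cons.mp hp).1 g0 hg0m
      have hpre : ∀ y ∈ F g,
          (fun a b => decide ((ord a :: key3 a) < (ord b :: key3 b))) x y = false := by
        intro y hy
        simp only [decide_eq_false_iff_not]
        intro hlt
        rcases List.cons_lt_cons_iff.mp hlt with h | h
        · rw [hx, hF g y hy] at h; exact absurd (h.trans hglt) (lt_irrefl g0)
        · rw [hx, hF g y hy] at h; exact hgg h.1.symm
      rw [pv_ins_skip _ _ _ _ hpre, if_neg hgg]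
      congr 1
      exact ih (List.pairwise_cons.mp hp).2 hg0m

-- the master split: a stable sort on the lexicographic key (ord r :: key3 r) is the
-- concatenation, over the strictly increasing list of group values, of the stable
-- sorts of the groups on key3 alone
lemma pvL {α : Type} (ord : α → Int) (key3 : α → List Int) (xs : List α) (gs : List Int)
    (hp : gs.Pairwise (· < ·)) (hmem : ∀ r ∈ xs, ord r ∈ gs) :
    PySem.List.sorted xs (fun r => ord r :: key3 r) false =
      gs.flatMap (fun g => PySem.List.sorted (xs.filter (fun r => ord r == g)) key3 false) := by
  induction xs using List.reverseRecOn with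
  | nil =>
    simp [PySem.List.sorted]
  | append_singleton xs x ih =>
    have hx : ord x ∈ gs := hmem x (by simp)
    have hF : ∀ g, ∀ y ∈ PySem.List.sorted (xs.filter (fun r => ord r == g)) key3 false, ord y = g := by
      intro g y hy
      have := (PySem.List.mem_sorted _ _ _ _).mp hy
      exact beq_iff_eq.mp (List.mem_filter.mp this).2
    rw [pv_sorted_append, ih (fun r hr => hmem r (by simp [hr])),
      pvINS ord key3 x (ord x) rfl gs _ hp hx hF]
    apply List.flatMap_congr
    intro g hg
    by_cases hgx : g = ord x
    · subst hgx
      rw [if_pos rfl]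
      have hfilt : (xs ++ [x]).filter (fun r => ord r == ord x) =
          xs.filter (fun r => ord r == ord x) ++ [x] := by
        simp [List.filter_append]
      rw [hfilt, pv_sorted_append]
      apply (pv_ins_congr _ _ _ _ _).symm
      intro y hy
      have hordy : ord y = ord x := hF (ord x) y hy
      simp [hordy]
    · rw [if_neg hgx]
      have hfilt : (xs ++ [x]).filter (fun r => ord r == g) =
          xs.filter (fun r => ord r == g) := by
        simp [List.filter_append, Ne.symm hgx]
      rw [hfilt]

-- find? on the (name, index) association list of A's sheet_order dict
lemma pv_find_zipIdx (names : List String) (k : Nat) (nm : String) :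
    List.find? (fun p => p.1 == nm) ((names.zipIdx k).map (fun p => (p.1, (p.2 : Int)))) =
      if nm ∈ names then some (nm, ((k + names.idxOf nm : Nat) : Int)) else none := by
  induction names generalizing k with
  | nil => simp
  | cons a names ih =>
    rw [List.zipIdx_cons, List.map_cons]
    by_cases ha : a = nm
    · subst ha
      rw [List.find?_cons_of_pos (by simp)]
      simp [List.idxOf_cons_self]
    · rw [List.find?_cons_of_neg (by simp [ha]), ih (k + 1)]
      by_cases hm : nm ∈ names
      · rw [if_pos hm, if_pos (by simp [hm]), List.idxOf_cons_ne _ ha]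
        have harith : k + 1 + List.idxOf nm names = k + (List.idxOf nm names + 1) := by omega
        rw [harith]
      · rw [if_neg hm, if_neg (by simp [hm, Ne.symm ha])]

-- the keys of an association list of the form names.map (fun n => (n, F n)) are names,
-- so Dict.contains is list membership and Dict find?-lookup reads off F
lemma pv_any_fst {ν : Type} (l : List (String × ν)) (nm : String) :
    (l.any fun p => p.1 == nm) = (l.map Prod.fst).contains nm := by
  rw [← List.any_beq', List.any_map]; rfl

lemma pv_find_map {ν : Type} (F : String → ν) (names : List String) (nm : String) :
    List.find? (fun p => p.1 == nm) (names.map (fun n => (n, F n))) =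
      if nm ∈ names then some (nm, F nm) else none := by
  induction names with
  | nil => simp
  | cons a names ih =>
    rw [List.map_cons]
    by_cases ha : a = nm
    · subst ha
      rw [List.find?_cons_of_pos (by simp)]
      simp
    · rw [List.find?_cons_of_neg (by simp [ha]), ih]
      simp [Ne.symm ha]

-- closed form of A's sheet_order dict: first-appearance names paired with 0,1,2,...
lemma pv_items_mk {κ ν : Type} (l : List (κ × ν)) : (PySem.Dict.mk l).items = l := rfl

lemma pvBuildA_append (xs : List (List (String × String))) (r : List (String × String)) :
    pvBuildA (xs ++ [r]) =
      (if (pvBuildA xs).contains (pvSheetName r) then pvBuildA xs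
       else (pvBuildA xs).insert (pvSheetName r) (pvBuildA xs).items.length) := by
  unfold pvBuildA
  rw [List.foldl_append, List.foldl_cons, List.foldl_nil]

lemma pvBuildB_append (xs : List (List (String × String))) (r : List (String × String)) :
    pvBuildB (xs ++ [r]) =
      (pvBuildB xs).insert (pvSheetName r) ((pvBuildB xs).getD (pvSheetName r) [] ++ [r]) := by
  unfold pvBuildB
  rw [List.foldl_append, List.foldl_cons, List.foldl_nil]

lemma pvNames_append (xs : List (List (String × String))) (r : List (String × String)) :
    pvNames (xs ++ [r]) = PySem.Set.add (pvNames xs) (pvSheetName r) := by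
  unfold pvNames
  rw [List.map_append, List.map_cons, List.map_nil, pv_ofList_append]

lemma pvA_items (records : List (List (String × String))) :
    (pvBuildA records).items = ((pvNames records).zipIdx).map (fun p => (p.1, (p.2 : Int))) := by
  induction records using List.reverseRecOn with
  | nil => rfl
  | append_singleton xs r ih =>
    rw [pvBuildA_append, pvNames_append]
    have hcont : (pvBuildA xs).contains (pvSheetName r) = (pvNames xs).contains (pvSheetName r) := by
      show ((pvBuildA xs).items.any _) = _
      rw [ih, pv_any_fst, List.map_map]
      have hfst : (Prod.fst ∘ fun p : String × Nat => (p.1, (p.2 : Int))) = Prod.fst := rfl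
      rw [hfst, List.zipIdx_map_fst]
    by_cases hm : pvSheetName r ∈ pvNames xs
    · rw [if_pos (by rw [hcont]; exact List.contains_iff_mem.mpr hm)]
      have h2 : PySem.Set.add (pvNames xs) (pvSheetName r) = pvNames xs := by
        simp [PySem.Set.add, hm]
      rw [h2, ih]
    · have h1 : (pvBuildA xs).contains (pvSheetName r) = false := by
        rw [hcont, Bool.eq_false_iff]
        intro h; exact hm (List.contains_iff_mem.mp h)
      rw [if_neg (by simp [h1])]
      have h2 : PySem.Set.add (pvNames xs) (pvSheetName r) = pvNames xs ++ [pvSheetName r] := by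
        simp [PySem.Set.add, hm]
      rw [h2]
      show ((pvBuildA xs).insert _ _).items = _
      simp only [PySem.Dict.insert, h1, Bool.false_eq_true, if_false]
      rw [ih, List.zipIdx_append, List.map_append]
      congr 1
      have hlen : ((pvNames xs).zipIdx.map (fun p : String × Nat => (p.1, (p.2 : Int)))).length
          = (pvNames xs).length := by simp
      rw [hlen]
      simp [List.zipIdx_cons]


lemma pvA_getD (records : List (List (String × String))) (r : List (String × String)) (h : r ∈ records) :
    PySem.Dict.getD (pvBuildA records) (pvSheetName r) 1000000000 =
      ((pvNames records).idxOf (pvSheetName r) : Nat) := by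
  have hmem : pvSheetName r ∈ pvNames records := by
    unfold pvNames
    exact (PySem.Set.mem_ofList _ _).mpr (List.mem_map_of_mem h)
  show ((PySem.Dict.get? _ _).getD _) = _
  rw [PySem.Dict.get?, pvA_items, pv_find_zipIdx, if_pos hmem]
  simp

-- closed form of B's buckets dict: first-appearance names paired with their filtered records
lemma pvB_items (records : List (List (String × String))) :
    (pvBuildB records).items =
      (pvNames records).map (fun nm => (nm, records.filter (fun r => pvSheetName r == nm))) := by
  induction records using List.reverseRecOn with
  | nil => rfl
  | append_singleton xs r ih =>
    rw [pvBuildB_append, pvNames_append]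
    have hcont : (pvBuildB xs).contains (pvSheetName r) = (pvNames xs).contains (pvSheetName r) := by
      show ((pvBuildB xs).items.any _) = _
      rw [ih, pv_any_fst, List.map_map]
      have hfst : (Prod.fst ∘ fun nm => (nm, xs.filter (fun r => pvSheetName r == nm))) = id := rfl
      rw [hfst, List.map_id]
    have hgetD : (pvBuildB xs).getD (pvSheetName r) [] =
        xs.filter (fun q => pvSheetName q == pvSheetName r) := by
      show ((PySem.Dict.get? _ _).getD _) = _
      rw [PySem.Dict.get?, ih, pv_find_map]
      by_cases hm : pvSheetName r ∈ pvNames xs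
      · rw [if_pos hm]; rfl
      · rw [if_neg hm]
        show [] = _
        rw [eq_comm, List.filter_eq_nil_iff]
        intro q hq hbeq
        exact hm (beq_iff_eq.mp hbeq ▸
          (PySem.Set.mem_ofList _ _).mpr (List.mem_map_of_mem hq))
    by_cases hm : pvSheetName r ∈ pvNames xs
    · have h2 : PySem.Set.add (pvNames xs) (pvSheetName r) = pvNames xs := by
        simp [PySem.Set.add, hm]
      rw [h2]
      have hc1 : (pvBuildB xs).contains (pvSheetName r) = true := by
        rw [hcont]; exact List.contains_iff_mem.mpr hm
      simp only [PySem.Dict.insert, hc1, if_true, pv_items_mk]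
      rw [ih, List.map_map]
      apply List.map_congr_left
      intro n hn
      by_cases hne : n = pvSheetName r
      · subst hne
        simp only [Function.comp_apply, beq_self_eq_true, if_pos]
        rw [hgetD, List.filter_append]
        simp
      · have : (n == pvSheetName r) = false := by simp [hne]
        simp only [Function.comp_apply, this, Bool.false_eq_true, if_false]
        rw [List.filter_append]
        have : (xs ++ [r]).filter (fun q => pvSheetName q == n) = xs.filter (fun q => pvSheetName q == n) := by
          rw [List.filter_append]
          simp [Ne.symm hne]
        simp [Ne.symm hne]
    · have h1 : (pvBuildB xs).contains (pvSheetName r) = false := by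
        rw [hcont, Bool.eq_false_iff]
        intro h; exact hm (List.contains_iff_mem.mp h)
      have h2 : PySem.Set.add (pvNames xs) (pvSheetName r) = pvNames xs ++ [pvSheetName r] := by
        simp [PySem.Set.add, hm]
      rw [h2]
      simp only [PySem.Dict.insert, h1, Bool.false_eq_true, if_false, pv_items_mk]
      rw [List.map_append, ih]
      congr 1
      · apply List.map_congr_left
        intro n hn
        have hne : pvSheetName r ≠ n := fun h => hm (h ▸ hn)
        rw [List.filter_append]
        simp [hne]
      · rw [hgetD]
        have hnil : xs.filter (fun q => pvSheetName q == pvSheetName r) = [] := by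
          rw [List.filter_eq_nil_iff]
          intro q hq hbeq
          exact hm (beq_iff_eq.mp hbeq ▸
            (PySem.Set.mem_ofList _ _).mpr (List.mem_map_of_mem hq))
        rw [hnil]
        simp [List.filter_append, hnil]

lemma pvB_eq (records : List (List (String × String))) :
    sort_candidate_records_by_sheet_column_alt records =
      (pvNames records).flatMap
        (fun nm => PySem.List.sorted (records.filter (fun r => pvSheetName r == nm)) pvKey3 false) := by
  rw [pvB_unfold, PySem.List.foldl_append_eq_flatMap, pvB_items, List.flatMap_map]
  rfl

-- iterating a list is iterating its indices
lemma pv_flatMap_range {β : Type} (names : List String) (G : String → List β) :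
    (List.range names.length).flatMap (fun i => G (names.getD i "")) = names.flatMap G := by
  induction names using List.reverseRecOn with
  | nil => simp
  | append_singleton names nm ih =>
    have hlen : (names ++ [nm]).length = names.length + 1 := by simp
    rw [hlen, List.range_succ, List.flatMap_append, List.flatMap_append]
    congr 1
    · rw [← ih]
      apply List.flatMap_congr
      intro i hi
      rw [List.getD_append names [nm] "" i (List.mem_range.mp hi)]
    · simp

-- ===== VERDICT (by name: the statement is the Claim_ definition above) =====
theorem sort_candidate_records_by_sheet_column_spec : Claim_equal_sort_candidate_records_by_sheet_column := by
  intro records _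
  unfold Spec_sort_candidate_records_by_sheet_column
  have hnodup : (pvNames records).Nodup := PySem.Set.nodup_ofList _
  have hmemname : ∀ r ∈ records, pvSheetName r ∈ pvNames records := fun r hr =>
    (PySem.Set.mem_ofList _ _).mpr (List.mem_map_of_mem hr)
  rw [pvA_unfold, pvB_eq]
  rw [pvL (fun r => PySem.Dict.getD (pvBuildA records) (pvSheetName r) 1000000000) pvKey3 records
        ((List.range (pvNames records).length).map Int.ofNat)
        ((List.pairwise_map).mpr (List.pairwise_lt_range.imp (fun h => Int.ofNat_lt.mpr h)))
        (fun r hr => by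
          show PySem.Dict.getD (pvBuildA records) (pvSheetName r) 1000000000 ∈ _
          rw [pvA_getD records r hr]
          exact List.mem_map.mpr ⟨(pvNames records).idxOf (pvSheetName r),
            List.mem_range.mpr (List.idxOf_lt_length_of_mem (hmemname r hr)), rfl⟩)]
  rw [List.flatMap_map,
    ← pv_flatMap_range (pvNames records)
      (fun nm => PySem.List.sorted (records.filter (fun r => pvSheetName r == nm)) pvKey3 false)]
  apply List.flatMap_congr
  intro i hi
  have hi2 : i < (pvNames records).length := List.mem_range.mp hi
  congr 1
  apply List.filter_congr
  intro r hr
  rw [pvA_getD records r hr, List.getD_eq_getElem (pvNames records) "" hi2]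
  have hlt : (pvNames records).idxOf (pvSheetName r) < (pvNames records).length :=
    List.idxOf_lt_length_of_mem (hmemname r hr)
  have hiff : (pvNames records).idxOf (pvSheetName r) = i ↔ pvSheetName r = (pvNames records)[i] := by
    constructor
    · intro h
      subst h
      exact (List.getElem_idxOf hlt).symm
    · intro h
      rw [h]
      exact List.Nodup.idxOf_getElem hnodup i hi2
  simp [hiff]
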